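-- pv_equiv track=rewrite | github.com/tpett20/LeetCode | 2610.py | findMatrix
-- ===== SOURCE A (Python) =====
-- def findMatrix(nums: list[int]) -> list[list[int]]:
--     m = {}
--     for num in nums:
--         if num in m:
--             m[num] += 1
--         else:
--             m[num] = 1
--     output = []
--     for num in m:
--         for i in range(m[num]):
--             if i >= len(output):
--                 output.append([num])
--             else:
--                 output[i].append(num)
--     return output
-- ===== SOURCE B (Python) =====
-- def findMatrix(nums: list[int]) -> list[list[int]]:
--     counts = {}
--     for num in nums:
--         counts[num] = counts.get(num, 0) + 1
--     maxc = max(counts.values(), default=0)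
--     return [[num for num in counts if counts[num] > r] for r in range(maxc)]
-- ===== Notes on version B (the rewrite author's own statement) =====
-- stated objective: alternative
-- what changed: Transposes the loop nesting: instead of scattering each number's copies into rows one by one (growing the output on demand), B counts frequencies once, computes the number of rows as the maximum count, and builds each row directly as the numbers whose count exceeds that row index.
import Mathlib
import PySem

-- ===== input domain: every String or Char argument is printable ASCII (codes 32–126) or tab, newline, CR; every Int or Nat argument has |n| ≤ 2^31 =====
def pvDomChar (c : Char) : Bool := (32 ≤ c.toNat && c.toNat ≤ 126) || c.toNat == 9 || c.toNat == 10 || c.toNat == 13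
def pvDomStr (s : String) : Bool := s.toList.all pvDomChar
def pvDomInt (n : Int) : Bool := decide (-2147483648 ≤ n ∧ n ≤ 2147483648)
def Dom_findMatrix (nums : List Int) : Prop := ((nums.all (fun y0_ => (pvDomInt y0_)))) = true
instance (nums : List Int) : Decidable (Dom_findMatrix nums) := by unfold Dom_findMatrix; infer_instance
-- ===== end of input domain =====

-- B builds the matrix row-major (each row = the numbers whose count exceeds the row index) instead of
-- A's number-by-number scattering into growing rows; same return value, no speed claim.

-- ===== PORT A =====
def findMatrix (nums : List Int) : List (List Int) :=
  let m := nums.foldl (fun d num =>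
    if d.contains num then d.modify num 0 (· + 1) else d.insert num 1) PySem.Dict.empty
  m.keys.foldl (fun output num =>
    (PySem.List.pyRange 0 (m.getD num 0) 1).foldl (fun output i =>
      if i ≥ (output.length : Int) then output ++ [[num]]
      -- here i ∈ range(m[num]) gives 0 ≤ i < len(output): output[i].append(num) is exactly set/getD at i.toNat
      else output.set i.toNat ((output.getD i.toNat []) ++ [num])) output) []

-- ===== PORT B =====
def findMatrix_alt (nums : List Int) : List (List Int) :=
  let counts := nums.foldl (fun d num => d.insert num (d.getD num 0 + 1)) PySem.Dict.empty
  let maxc := (PySem.List.max? counts.values (fun v => v)).getD 0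
  (PySem.List.pyRange 0 maxc 1).map (fun r =>
    counts.keys.filter (fun num => counts.getD num 0 > r))

-- ===== PRECONDITION & SPEC =====
def Spec_findMatrix (nums : List Int) (out : List (List Int)) : Prop := out = findMatrix_alt nums
instance (nums : List Int) (out : List (List Int)) : Decidable (Spec_findMatrix nums out) := by unfold Spec_findMatrix; infer_instance

-- ===== CLAIM (what is proved, stated in full; the proofs are below) =====
def Claim_equal_findMatrix : Prop := ∀ (nums : List Int), Dom_findMatrix nums → Spec_findMatrix nums (findMatrix nums)

-- ===== LEMMAS AND PROOFS =====

theorem pv_dictA_eq (nums : List Int) :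
    nums.foldl (fun d num =>
      if d.contains num then d.modify num 0 (· + 1) else d.insert num 1) PySem.Dict.empty
      = PySem.Dict.counter nums := by
  rw [PySem.Dict.counter_eq_foldl]
  congr 1
  funext d num
  by_cases h : d.contains num = true
  · rw [if_pos h]
  · simp only [Bool.not_eq_true] at h
    rw [if_neg (by simp [h])]
    simp [PySem.Dict.modify, PySem.Dict.getD_of_not_contains _ _ h]

theorem pv_pyRange_nonneg (n : Int) (h : 0 ≤ n) :
    PySem.List.pyRange 0 n 1 = (List.range n.toNat).map Int.ofNat := by
  simp only [PySem.List.pyRange]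
  split_ifs with h0 h1 h2
  · omega
  · have hc : ((n - 0 + 1 - 1) / 1) = n := by omega
    rw [hc]
    apply List.map_congr_left
    intro a _
    simp
  · have h2' : n = 0 := by omega
    subst h2'
    simp
  · omega
  · omega

def pvInner (num : Int) (out : List (List Int)) (m : Nat) : List (List Int) :=
  (List.range m).foldl (fun output k =>
    if output.length ≤ k then output ++ [[num]]
    else output.set k ((output.getD k []) ++ [num])) out

theorem pv_inner_eq (num : Int) (out : List (List Int)) (n : Int) (h : 0 ≤ n) :
    (PySem.List.pyRange 0 n 1).foldl (fun output i =>
      if i ≥ (output.length : Int) then output ++ [[num]]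
      else output.set i.toNat ((output.getD i.toNat []) ++ [num])) out
    = pvInner num out n.toNat := by
  rw [pv_pyRange_nonneg n h, List.foldl_map, pvInner]
  have hf : (fun (output : List (List Int)) (k : Nat) =>
      if (Int.ofNat k) ≥ (output.length : Int) then output ++ [[num]]
      else output.set (Int.ofNat k).toNat ((output.getD (Int.ofNat k).toNat []) ++ [num]))
      = (fun (output : List (List Int)) (k : Nat) =>
      if output.length ≤ k then output ++ [[num]]
      else output.set k ((output.getD k []) ++ [num])) := by
    funext output k
    have ht : (Int.ofNat k).toNat = k := rfl
    by_cases hk : output.length ≤ k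
    · have h1 : ((Int.ofNat k) ≥ (output.length : Int)) := by simp; omega
      simp only [if_pos h1, if_pos hk]
    · have h1 : ¬ ((Int.ofNat k) ≥ (output.length : Int)) := by simp; omega
      simp only [if_neg h1, if_neg hk, ht]
  rw [hf]

theorem pv_map_range_getD (out : List (List Int)) :
    (List.range out.length).map (fun r => out.getD r []) = out := by
  apply List.ext_getElem
  · simp
  · intro i h1 h2
    simp [List.getElem?_eq_getElem h2]

theorem pv_inner_spec (num : Int) (out : List (List Int)) (m : Nat) :
    pvInner num out m
      = (List.range (max out.length m)).map
          (fun r => out.getD r [] ++ if r < m then [num] else []) := by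
  induction m with
  | zero =>
    have : ∀ r : Nat, out.getD r [] ++ (if r < 0 then [num] else []) = out.getD r [] := by
      intro r; simp
    simp only [pvInner, List.range_zero, List.foldl_nil, Nat.max_zero, this, pv_map_range_getD]
  | succ m ih =>
    have hstep : pvInner num out (m + 1)
        = (if (pvInner num out m).length ≤ m then pvInner num out m ++ [[num]]
           else (pvInner num out m).set m (((pvInner num out m).getD m []) ++ [num])) := by
      rw [pvInner, List.range_succ, List.foldl_append, List.foldl_cons, List.foldl_nil]
      rfl
    rw [hstep, ih]
    have hlen : ((List.range (max out.length m)).map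
        (fun r => out.getD r [] ++ if r < m then [num] else [])).length = max out.length m := by
      simp
    by_cases hc : out.length ≤ m
    · have hclen : ((List.range (max out.length m)).map
          (fun r => out.getD r [] ++ if r < m then [num] else [])).length ≤ m := by
        rw [hlen]; omega
      have hmax : max out.length m = m := by omega
      have hmax' : max out.length (m + 1) = m + 1 := by omega
      rw [if_pos hclen, hmax', List.range_succ, List.map_append, hmax]
      congr 1
      · apply List.map_congr_left
        intro r hr
        rw [List.mem_range] at hr
        have h2 : r < m + 1 := by omega
        rw [if_pos hr, if_pos h2]
      · simp [List.getElem?_eq_none hc]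
    · have hm : m < out.length := by omega
      have hclen : ¬ ((List.range (max out.length m)).map
          (fun r => out.getD r [] ++ if r < m then [num] else [])).length ≤ m := by
        rw [hlen]; omega
      have hmax : max out.length m = out.length := by omega
      have hmax' : max out.length (m + 1) = out.length := by omega
      rw [if_neg hclen, hmax, hmax']
      have hmlt : m < ((List.range out.length).map
          (fun r => out.getD r [] ++ if r < m then [num] else [])).length := by simp [hm]
      have hgetD : ((List.range out.length).map
          (fun r => out.getD r [] ++ if r < m then [num] else [])).getD m [] = out.getD m [] := by
        rw [List.getD_eq_getElem _ _ hmlt]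
        simp
      rw [hgetD]
      apply List.ext_getElem
      · simp
      · intro i h1 h2
        simp only [List.length_set, List.length_map, List.length_range] at h1
        rw [List.getElem_set]
        by_cases hi : m = i
        · subst hi
          simp
        · rw [if_neg hi]
          have h1' : i < ((List.range out.length).map
              (fun r => out.getD r [] ++ if r < m then [num] else [])).length := by simp [h1]
          rw [List.getElem_map, List.getElem_map]
          simp only [List.getElem_range]
          congr 1
          by_cases hlt : i < m
          · have h3 : i < m + 1 := by omega
            simp [hlt, h3]
          · have h3 : ¬ i < m + 1 := by omega
            simp [hlt, h3]

def pvMx (c : Int → Int) (ks : List Int) : Int := (ks.map c).foldl max 0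

def pvBuild (c : Int → Int) (ks : List Int) : List (List Int) :=
  (List.range (pvMx c ks).toNat).map (fun (r : Nat) => ks.filter (fun k => decide (c k > (r : Int))))

theorem pv_Mx_nonneg (c : Int → Int) (ks : List Int) : 0 ≤ pvMx c ks :=
  (PySem.List.le_foldl_max (ks.map c) 0).1

theorem pv_le_Mx (c : Int → Int) (ks : List Int) (k : Int) (hk : k ∈ ks) : c k ≤ pvMx c ks :=
  (PySem.List.le_foldl_max (ks.map c) 0).2 (c k) (List.mem_map_of_mem hk)

theorem pv_Mx_append (c : Int → Int) (ks : List Int) (k : Int) :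
    pvMx c (ks ++ [k]) = max (pvMx c ks) (c k) := by
  simp [pvMx]

theorem pv_outer (c : Int → Int) (hc : ∀ k, 0 ≤ c k) (ks : List Int) :
    ks.foldl (fun out k => pvInner k out (c k).toNat) [] = pvBuild c ks := by
  induction ks using List.reverseRecOn with
  | nil => simp [pvBuild, pvMx]
  | append_singleton ks k ih =>
    rw [List.foldl_append, List.foldl_cons, List.foldl_nil, ih, pv_inner_spec]
    have hlen : (pvBuild c ks).length = (pvMx c ks).toNat := by simp [pvBuild]
    have hN : max (pvBuild c ks).length (c k).toNat = (pvMx c (ks ++ [k])).toNat := by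
      rw [hlen, pv_Mx_append]
      have h1 := pv_Mx_nonneg c ks
      have h2 := hc k
      omega
    rw [hN]
    show _ = (List.range (pvMx c (ks ++ [k])).toNat).map
      (fun (r : Nat) => (ks ++ [k]).filter (fun x => decide (c x > (r : Int))))
    apply List.map_congr_left
    intro r hr
    rw [List.mem_range] at hr
    have hck : (r < (c k).toNat) ↔ (c k > (r : Int)) := by
      have := hc k; omega
    have hfilter : (ks ++ [k]).filter (fun x => decide (c x > (r : Int)))
        = ks.filter (fun x => decide (c x > (r : Int)))
          ++ if r < (c k).toNat then [k] else [] := by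
      rw [List.filter_append]
      congr 1
      by_cases h : c k > (r : Int)
      · simp [h, hck.mpr h]
      · simp [h]
    rw [hfilter]
    congr 1
    by_cases h : r < (pvMx c ks).toNat
    · have hlt : r < (pvBuild c ks).length := by rw [hlen]; exact h
      rw [List.getD_eq_getElem _ _ hlt]
      simp [pvBuild]
    · rw [List.getD_eq_default _ _ (by rw [hlen]; omega)]
      symm
      rw [List.filter_eq_nil_iff]
      intro x hx
      have h1 := pv_le_Mx c ks x hx
      have h2 := pv_Mx_nonneg c ks
      simp only [decide_eq_true_eq]
      omega

theorem pv_max_getD (l : List Int) (hnn : ∀ x ∈ l, 0 ≤ x) :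
    (PySem.List.max? l (fun v => v)).getD 0 = l.foldl max 0 := by
  cases l with
  | nil => simp [PySem.List.max?]
  | cons x t =>
    rw [PySem.List.max?_id_cons]
    have hx : max 0 x = x := by
      have := hnn x (List.mem_cons_self ..)
      omega
    simp only [Option.getD_some, List.foldl_cons]
    rw [hx]

theorem pv_main (nums : List Int) : findMatrix nums = findMatrix_alt nums := by
  have hc : ∀ k, 0 ≤ (fun k => (PySem.Dict.counter nums).getD k 0) k := by
    intro k
    simp only [PySem.Dict.getD_counter]
    exact Int.natCast_nonneg _
  have hA : findMatrix nums
      = pvBuild (fun k => (PySem.Dict.counter nums).getD k 0) (PySem.Dict.counter nums).keys := by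
    unfold findMatrix
    rw [pv_dictA_eq]
    show (PySem.Dict.counter nums).keys.foldl (fun output num =>
        (PySem.List.pyRange 0 ((PySem.Dict.counter nums).getD num 0) 1).foldl (fun output i =>
          if i ≥ (output.length : Int) then output ++ [[num]]
          else output.set i.toNat ((output.getD i.toNat []) ++ [num])) output) [] = _
    have hL : (PySem.Dict.counter nums).keys.foldl (fun output num =>
        (PySem.List.pyRange 0 ((PySem.Dict.counter nums).getD num 0) 1).foldl (fun output i =>
          if i ≥ (output.length : Int) then output ++ [[num]]
          else output.set i.toNat ((output.getD i.toNat []) ++ [num])) output) []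
        = (PySem.Dict.counter nums).keys.foldl
            (fun out k => pvInner k out (((fun k => (PySem.Dict.counter nums).getD k 0) k)).toNat) [] := by
      congr 1
      funext output num
      exact pv_inner_eq num output _ (hc num)
    rw [hL]
    exact pv_outer _ hc _
  have hB : findMatrix_alt nums
      = pvBuild (fun k => (PySem.Dict.counter nums).getD k 0) (PySem.Dict.counter nums).keys := by
    unfold findMatrix_alt
    rw [PySem.Dict.foldl_insert_getD_add_one_eq_counter]
    show (PySem.List.pyRange 0 ((PySem.List.max? (PySem.Dict.counter nums).values (fun v => v)).getD 0) 1).map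
        (fun r => (PySem.Dict.counter nums).keys.filter
          (fun num => (PySem.Dict.counter nums).getD num 0 > r)) = _
    have hv : (PySem.List.max? (PySem.Dict.counter nums).values (fun v => v)).getD 0
        = pvMx (fun k => (PySem.Dict.counter nums).getD k 0) (PySem.Dict.counter nums).keys := by
      rw [PySem.Dict.values_eq_map_keys _ (PySem.Dict.nodup_keys_counter nums) 0]
      rw [pv_max_getD _ (by
        intro x hx
        rcases List.mem_map.mp hx with ⟨k, _, rfl⟩
        exact hc k)]
      rfl
    rw [hv, pv_pyRange_nonneg _ (pv_Mx_nonneg _ _), List.map_map, pvBuild]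
    apply List.map_congr_left
    intro r _
    rfl
  rw [hA, hB]

-- ===== VERDICT (by name: the statement is the Claim_ definition above) =====
theorem findMatrix_spec : Claim_equal_findMatrix := by
  intro nums _
  unfold Spec_findMatrix
  exact pv_main nums
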